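-- pv_equiv track=rewrite | github.com/MrBrantCode/unitest_baseline | mut_generate/mist_train_cf/cf_73959/solution.py | verify_seven
-- ===== SOURCE A (Python) =====
-- def verify_seven(string):
--     def is_prime(n):
--         if n <= 1:
--             return False
--         elif n == 2:
--             return True
--         elif n % 2 == 0:
--             return False
--         sqr = int(n**0.5) + 1
--         for divisor in range(3, sqr, 2):
--             if n % divisor == 0:
--                 return False
--         return True
--
--     string = ''.join(c for c in string if c.isdigit())
--     len_string = len(string)
--
--     for i in range(1, len_string - 1):
--         if (string[i] == '7' and
--             is_prime(int(string[i-1])) and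
--             is_prime(int(string[i+1]))):
--             return i
--     return -1
-- ===== SOURCE B (Python) =====
-- def verify_seven(string):
--     # one streaming pass: keep the last two digits seen; a digit is prime iff it is 2,3,5 or 7
--     i = 0
--     a = b = None
--     for c in string:
--         if not c.isdigit():
--             continue
--         if b == '7' and a in ('2', '3', '5', '7') and c in ('2', '3', '5', '7'):
--             return i - 1
--         a, b = b, c
--         i += 1
--     return -1
-- ===== Notes on version B (the rewrite author's own statement) =====
-- stated objective: alternative
-- what changed: Replaces A's filter-join + index loop with trial-division primality tests by a single streaming pass that carries only the last two digits seen and checks neighbors against the literal prime-digit set {2,3,5,7}, building no intermediate filtered string.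
import Mathlib
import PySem

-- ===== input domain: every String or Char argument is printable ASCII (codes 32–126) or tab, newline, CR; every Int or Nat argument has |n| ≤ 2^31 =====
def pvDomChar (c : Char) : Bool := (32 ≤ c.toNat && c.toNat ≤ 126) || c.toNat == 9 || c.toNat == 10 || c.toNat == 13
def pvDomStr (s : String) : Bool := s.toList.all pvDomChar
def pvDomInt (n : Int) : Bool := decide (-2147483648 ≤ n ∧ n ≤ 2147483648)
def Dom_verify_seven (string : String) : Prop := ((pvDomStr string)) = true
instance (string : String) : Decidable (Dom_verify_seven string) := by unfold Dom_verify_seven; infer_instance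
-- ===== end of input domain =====

-- B replaces A's filter-join + index loop with trial-division primality by one streaming pass
-- carrying the last two digits and the literal prime-digit set {2,3,5,7} (objective: alternative).

-- ===== PORT A =====
-- is_prime, transliterated; 'int(n**0.5)' is rendered Nat.sqrt, exact on the single-digit
-- values 0..9 this program ever passes to it.
def isPrimeA (n : Int) : Bool :=
  if n ≤ 1 then false
  else if n = 2 then true
  else if PySem.Int.mod n 2 = 0 then false
  else
    let sqr : Int := Int.ofNat (Nat.sqrt n.toNat) + 1
    (PySem.List.pyRange 3 sqr 2).all (fun d => !(PySem.Int.mod n d = 0))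

-- the 'for i in range(1, len_string - 1)' loop with early return
def loopA (ds : List Char) : List Int → Int
  | [] => -1
  | i :: rest =>
    if (PySem.List.pyGet? ds i).getD ' ' = '7'
        ∧ isPrimeA ((PySem.Int.ofChars? [(PySem.List.pyGet? ds (i - 1)).getD ' ']).getD 0) = true
        ∧ isPrimeA ((PySem.Int.ofChars? [(PySem.List.pyGet? ds (i + 1)).getD ' ']).getD 0) = true
    then i else loopA ds rest

def verify_seven (string : String) : Int :=
  -- string = ''.join(c for c in string if c.isdigit()); len_string = len(string)
  let ds : List Char := string.toList.filter (fun c => PySem.Chars.isdigit c)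
  let len_string : Int := (ds.length : Int)
  loopA ds (PySem.List.pyRange 1 (len_string - 1) 1)

-- ===== PORT B =====
-- streaming pass: i counts digits seen, a and b are the previous two digits (None until seen)
def loopB : List Char → Int → Option Char → Option Char → Int
  | [], _, _, _ => -1
  | c :: rest, i, a, b =>
    if PySem.Chars.isdigit c = false then loopB rest i a b
    else if b = some '7'
            ∧ (a = some '2' ∨ a = some '3' ∨ a = some '5' ∨ a = some '7')
            ∧ (c = '2' ∨ c = '3' ∨ c = '5' ∨ c = '7')
    then i - 1
    else loopB rest (i + 1) b (some c)

def verify_seven_alt (string : String) : Int :=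
  loopB string.toList 0 none none

-- ===== PRECONDITION & SPEC =====
def Spec_verify_seven (string : String) (out : Int) : Prop := out = verify_seven_alt string
instance (string : String) (out : Int) : Decidable (Spec_verify_seven string out) := by unfold Spec_verify_seven; infer_instance

-- ===== CLAIM (what is proved, stated in full; the proofs are below) =====
def Claim_equal_verify_seven : Prop := ∀ (string : String), Dom_verify_seven string → Spec_verify_seven string (verify_seven string)

-- ===== LEMMAS AND PROOFS =====

-- common reference function: first window a::b::c with b='7' and a,c prime digits;
-- G xs i returns i + (window start) + 1, i.e. the center's absolute index
def G : List Char → Int → Int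
  | a :: b :: c :: r, i =>
    if b = '7' ∧ (a = '2' ∨ a = '3' ∨ a = '5' ∨ a = '7') ∧ (c = '2' ∨ c = '3' ∨ c = '5' ∨ c = '7')
    then i + 1 else G (b :: c :: r) (i + 1)
  | _, _ => -1

-- loopB without the skip branch, acting on the digit-filtered list
def loopB' : List Char → Int → Option Char → Option Char → Int
  | [], _, _, _ => -1
  | c :: rest, i, a, b =>
    if b = some '7'
        ∧ (a = some '2' ∨ a = some '3' ∨ a = some '5' ∨ a = some '7')
        ∧ (c = '2' ∨ c = '3' ∨ c = '5' ∨ c = '7')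
    then i - 1
    else loopB' rest (i + 1) b (some c)

theorem digit_enum (c : Char) (h : PySem.Chars.isdigit c = true) :
    c = '0' ∨ c = '1' ∨ c = '2' ∨ c = '3' ∨ c = '4' ∨ c = '5' ∨ c = '6' ∨ c = '7' ∨ c = '8' ∨ c = '9' := by
  simp [PySem.Chars.isdigit] at h
  obtain ⟨h1, h2⟩ := h
  have b1 : 48 ≤ c.toNat := h1
  have b2 : c.toNat ≤ 57 := h2
  have hc := Char.ofNat_toNat c
  interval_cases h3 : c.toNat <;> rw [← hc] <;> decide

theorem isPrimeA_vals :
    isPrimeA 0 = false ∧ isPrimeA 1 = false ∧ isPrimeA 2 = true ∧ isPrimeA 3 = true ∧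
    isPrimeA 4 = false ∧ isPrimeA 5 = true ∧ isPrimeA 6 = false ∧ isPrimeA 7 = true ∧
    isPrimeA 8 = false ∧ isPrimeA 9 = false := by
  refine ⟨by decide, by decide, by decide, ?_, by decide, ?_, by decide, ?_, by decide, ?_⟩
  · unfold isPrimeA
    norm_num [show ((3:Int).toNat) = 3 from rfl, show Nat.sqrt 3 = 1 from by norm_num]
    decide
  · unfold isPrimeA
    norm_num [show ((5:Int).toNat) = 5 from rfl, show Nat.sqrt 5 = 2 from by norm_num]
    decide
  · unfold isPrimeA
    norm_num [show ((7:Int).toNat) = 7 from rfl, show Nat.sqrt 7 = 2 from by norm_num]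
    decide
  · unfold isPrimeA
    norm_num [show ((9:Int).toNat) = 9 from rfl, show Nat.sqrt 9 = 3 from by norm_num]
    exact ⟨3, by decide, by decide⟩

-- for a digit character, A's primality test agrees with membership in {2,3,5,7}
theorem prime_digit (c : Char) (h : PySem.Chars.isdigit c = true) :
    (isPrimeA ((PySem.Int.ofChars? [c]).getD 0) = true) ↔ (c = '2' ∨ c = '3' ∨ c = '5' ∨ c = '7') := by
  obtain ⟨p0, p1, p2, p3, p4, p5, p6, p7, p8, p9⟩ := isPrimeA_vals
  rcases digit_enum c h with h | h | h | h | h | h | h | h | h | h <;> subst h <;>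
    simp only [show (PySem.Int.ofChars? ['0']).getD 0 = (0:Int) from by decide,
      show (PySem.Int.ofChars? ['1']).getD 0 = (1:Int) from by decide,
      show (PySem.Int.ofChars? ['2']).getD 0 = (2:Int) from by decide,
      show (PySem.Int.ofChars? ['3']).getD 0 = (3:Int) from by decide,
      show (PySem.Int.ofChars? ['4']).getD 0 = (4:Int) from by decide,
      show (PySem.Int.ofChars? ['5']).getD 0 = (5:Int) from by decide,
      show (PySem.Int.ofChars? ['6']).getD 0 = (6:Int) from by decide,
      show (PySem.Int.ofChars? ['7']).getD 0 = (7:Int) from by decide,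
      show (PySem.Int.ofChars? ['8']).getD 0 = (8:Int) from by decide,
      show (PySem.Int.ofChars? ['9']).getD 0 = (9:Int) from by decide,
      p0, p1, p2, p3, p4, p5, p6, p7, p8, p9] <;> decide

theorem loopB_eq_loopB' (cs : List Char) :
    ∀ i a b, loopB cs i a b = loopB' (cs.filter (fun c => PySem.Chars.isdigit c)) i a b := by
  induction cs with
  | nil => intro i a b; rfl
  | cons c rest ih =>
    intro i a b
    by_cases hd : PySem.Chars.isdigit c = true
    · simp only [loopB, loopB', List.filter, hd, Bool.true_eq_false, if_false]
      split_ifs with h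
      · rfl
      · exact ih (i + 1) b (some c)
    · simp only [Bool.not_eq_true] at hd
      simp only [loopB, List.filter, hd, if_true]
      exact ih i a b

theorem loopB'_some (ds : List Char) :
    ∀ (i : Int) (x y : Char), loopB' ds i (some x) (some y) = G (x :: y :: ds) (i - 2) := by
  induction ds with
  | nil => intro i x y; rfl
  | cons c r ih =>
    intro i x y
    rw [loopB', G]
    simp only [Option.some.injEq]
    split_ifs with h
    · omega
    · rw [ih (i + 1) y c]
      congr 1
      omega

theorem loopB'_start (ds : List Char) : loopB' ds 0 none none = G ds 0 := by
  match ds with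
  | [] => rfl
  | [c] => simp [loopB', G]
  | c :: d :: r =>
    simp only [loopB', reduceCtorEq, false_and, and_false, or_self, if_false]
    rw [show (0:Int) + 1 + 1 = 2 from by norm_num, loopB'_some r 2 c d]
    norm_num

-- A's index loop from t+1 equals G on the suffix from t, for all-digit lists
theorem loopA_eq_G (ds : List Char) (hdig : ∀ c ∈ ds, PySem.Chars.isdigit c = true) :
    ∀ (t : Nat), loopA ds (PySem.List.pyRange ((t : Int) + 1) ((ds.length : Int) - 1) 1) = G (ds.drop t) t := by
  intro t
  induction hk : ds.length - t generalizing t with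
  | zero =>
    have hle : (ds.length : Int) - 1 ≤ (t : Int) + 1 := by omega
    rw [PySem.List.pyRange_one_eq_nil hle, loopA]
    have hnil : ds.drop t = [] := List.drop_eq_nil_of_le (by omega)
    rw [hnil]
    rfl
  | succ k ih =>
    by_cases hbig : t + 3 ≤ ds.length
    · -- nonempty range, window exists
      have hlt : (t : Int) + 1 < (ds.length : Int) - 1 := by omega
      rw [PySem.List.pyRange_one_cons hlt, loopA]
      have hlen : 3 ≤ (ds.drop t).length := by simp [List.length_drop]; omega
      obtain ⟨a, b, c, r, hd⟩ : ∃ a b c r, ds.drop t = a :: b :: c :: r := by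
        match hds : ds.drop t with
        | [] => rw [hds] at hlen; simp at hlen
        | [a] => rw [hds] at hlen; simp at hlen
        | [a, b] => rw [hds] at hlen; simp at hlen
        | a :: b :: c :: r => exact ⟨a, b, c, r, rfl⟩
      have ga : ds[t + 0]? = some a := by rw [← List.getElem?_drop, hd]; rfl
      have gb : ds[t + 1]? = some b := by rw [← List.getElem?_drop, hd]; rfl
      have gc : ds[t + 2]? = some c := by rw [← List.getElem?_drop, hd]; rfl
      have ea : PySem.List.pyGet? ds ((t : Int) + 1 - 1) = some a := by
        rw [show (t : Int) + 1 - 1 = ((t + 0 : Nat) : Int) from by push_cast; ring,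
          PySem.List.pyGet?_natCast, ga]
      have eb : PySem.List.pyGet? ds ((t : Int) + 1) = some b := by
        rw [show (t : Int) + 1 = ((t + 1 : Nat) : Int) from by push_cast; ring,
          PySem.List.pyGet?_natCast, gb]
      have ec : PySem.List.pyGet? ds ((t : Int) + 1 + 1) = some c := by
        rw [show (t : Int) + 1 + 1 = ((t + 2 : Nat) : Int) from by push_cast; ring,
          PySem.List.pyGet?_natCast, gc]
      have hadig : PySem.Chars.isdigit a = true :=
        hdig a (List.mem_of_mem_drop (by rw [hd]; simp))
      have hcdig : PySem.Chars.isdigit c = true :=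
        hdig c (List.mem_of_mem_drop (by rw [hd]; simp))
      rw [ea, eb, ec]
      simp only [Option.getD_some]
      have hiff : (b = '7'
            ∧ isPrimeA ((PySem.Int.ofChars? [a]).getD 0) = true
            ∧ isPrimeA ((PySem.Int.ofChars? [c]).getD 0) = true) ↔
          (b = '7' ∧ (a = '2' ∨ a = '3' ∨ a = '5' ∨ a = '7')
            ∧ (c = '2' ∨ c = '3' ∨ c = '5' ∨ c = '7')) := by
        constructor
        · rintro ⟨e7, pa, pc⟩
          exact ⟨e7, (prime_digit a hadig).mp pa, (prime_digit c hcdig).mp pc⟩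
        · rintro ⟨e7, ma, mc⟩
          exact ⟨e7, (prime_digit a hadig).mpr ma, (prime_digit c hcdig).mpr mc⟩
      rw [hd, G]
      have hdrop : ds.drop (t + 1) = b :: c :: r := by
        have h1 : ds.drop (t + 1) = (ds.drop t).drop 1 := by rw [List.drop_drop]
        rw [h1, hd]; rfl
      by_cases hq : b = '7' ∧ (a = '2' ∨ a = '3' ∨ a = '5' ∨ a = '7')
          ∧ (c = '2' ∨ c = '3' ∨ c = '5' ∨ c = '7')
      · rw [if_pos (hiff.mpr hq), if_pos hq]
      · rw [if_neg (fun hh => hq (hiff.mp hh)), if_neg hq]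
        have ih' := ih (t + 1) (by omega)
        rw [hdrop] at ih'
        rw [show (t : Int) + 1 + 1 = (((t + 1 : Nat)) : Int) + 1 from by push_cast; ring,
          show (t : Int) + 1 = (((t + 1 : Nat)) : Int) from by push_cast; ring]
        exact ih'
    · -- fewer than three elements after t: empty range and G = -1
      have hle : (ds.length : Int) - 1 ≤ (t : Int) + 1 := by omega
      rw [PySem.List.pyRange_one_eq_nil hle, loopA]
      match hds : ds.drop t with
      | [] => rfl
      | [x] => rfl
      | [x, y] => rfl
      | x :: y :: z :: r =>
        exfalso
        have hlc := congrArg List.length hds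
        simp [List.length_drop] at hlc
        omega

-- ===== VERDICT (by name: the statement is the Claim_ definition above) =====
theorem verify_seven_spec : Claim_equal_verify_seven := by
  intro s _
  unfold Spec_verify_seven verify_seven verify_seven_alt
  have hdig : ∀ c ∈ s.toList.filter (fun c => PySem.Chars.isdigit c), PySem.Chars.isdigit c = true := by
    intro c hc; exact (List.mem_filter.mp hc).2
  have hA := loopA_eq_G (s.toList.filter (fun c => PySem.Chars.isdigit c)) hdig 0
  simp only [Nat.cast_zero, zero_add, List.drop_zero] at hA
  rw [hA, loopB_eq_loopB', loopB'_start]
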